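-- pv_equiv track=rewrite | github.com/z1ming/LeetCode-Notebook | source/All_Solutions/647.回文子串.py | countSubstrings
-- ===== SOURCE A (Python) =====
-- def countSubstrings(s: str) -> int:
--     # 先把字符串转换成(字符,计数)的列表形式，如'aabccc'变为[('a',2),('b',1),('c',3)]，后续加速计算
--     counts, count = [], 1
--     for i in range(len(s)-1):
--         if s[i] == s[i+1]:
--             count += 1
--         else:
--             counts.append((s[i], count))
--             count = 1
--     counts.append((s[-1], count))
--     res = 0
--     for i in range(len(counts)):
--         res += counts[i][1]*(counts[i][1]+1)//2
--         # 单个(字符,计数)能构成的回文串个数，排列组合知识，即在x个字母构成的x+1个空里选两个隔板截取子串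
--         # 即组合数C_(x+1)^2，如计数为3，则构成(3+1)*3/2=6个
--         j = 1  # 以counts[i]为中心串后往两边考虑的扩张(字符，计数）个数
--         while i-j >= 0 and i+j < len(counts):
--             left, right = counts[i-j], counts[i+j]
--             if left[0] == right[0]:  # 左右字符相同
--                 if left[1] != right[1]:  # 计数不同
--                     res += min(left[1], right[1])  # 加上最小值
--                     break  # 停止扩张
--                 else:
--                     res += left[1]  # 左右计数相同，则直接加上其计数
--                     j += 1  # 继续扩张
--             else:
--                 break  # 字符不同直接停止扩张
--     return res
-- ===== SOURCE B (Python) =====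
-- def countSubstrings(s: str) -> int:
--     # run-length encode by per-character fold (last-run update)
--     runs = []
--     for ch in s:
--         if runs and runs[-1][0] == ch:
--             runs[-1] = (ch, runs[-1][1] + 1)
--         else:
--             runs.append((ch, 1))
--     # palindromes inside a single run, closed form
--     res = sum(c * (c + 1) // 2 for _, c in runs)
--     m = len(runs)
--     # level-synchronous sweep: all centers advance one shell per level d,
--     # a shrinking frontier of centers whose shells are still exact matches
--     alive = list(range(m))
--     for d in range(1, m):
--         nxt = []
--         for i in alive:
--             if i - d < 0 or i + d >= m:
--                 continue
--             lc, ln = runs[i - d]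
--             rc, rn = runs[i + d]
--             if lc != rc:
--                 continue
--             if ln == rn:
--                 res += ln
--                 nxt.append(i)
--             else:
--                 res += min(ln, rn)
--         alive = nxt
--     return res
-- ===== Notes on version B (the rewrite author's own statement) =====
-- stated objective: alternative
-- what changed: B builds the run-length encoding by a per-character fold instead of index lookahead, counts within-run palindromes by one closed-form sum, and replaces A's per-center outward expansion with break by a level-synchronous sweep that advances all centers one shell per level over a shrinking frontier of still-exact centers.
-- outside the precondition, e.g. on countSubstrings(''): A raises IndexError, B returns 0
import Mathlib
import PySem

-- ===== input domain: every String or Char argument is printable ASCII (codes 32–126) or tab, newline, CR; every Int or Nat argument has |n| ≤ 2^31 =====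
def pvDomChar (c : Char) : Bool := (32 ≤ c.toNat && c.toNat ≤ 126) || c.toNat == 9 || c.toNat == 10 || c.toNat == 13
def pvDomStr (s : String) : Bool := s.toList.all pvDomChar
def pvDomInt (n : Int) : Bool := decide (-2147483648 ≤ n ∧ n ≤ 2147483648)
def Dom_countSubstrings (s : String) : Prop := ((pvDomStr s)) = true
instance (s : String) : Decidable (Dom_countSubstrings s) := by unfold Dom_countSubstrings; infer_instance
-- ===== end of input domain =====

-- B replaces A's per-center expansion-with-break by a level-synchronous sweep over a
-- shrinking frontier (objective: alternative; same asymptotic cost).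

-- ===== PORT A =====

-- one step of A's first loop (build the (char, count) list with an index lookahead)
def pvStep1 (l : List Char) (st : List (Char × Int) × Int) (i : Int) : List (Char × Int) × Int :=
  if PySem.List.pyGet? l i = PySem.List.pyGet? l (i + 1) then (st.1, st.2 + 1)
  else (st.1 ++ [((PySem.List.pyGet? l i).getD ' ', st.2)], 1)

-- A's inner `while i-j >= 0 and i+j < len(counts)` loop, accumulating `res`
def pvWhileA (counts : List (Char × Int)) (i j res : Int) : Int :=
  if h : 0 ≤ i - j ∧ i + j < (counts.length : Int) then
    let left := PySem.List.pyGetD counts (i - j) (' ', 0)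
    let right := PySem.List.pyGetD counts (i + j) (' ', 0)
    if left.1 = right.1 then
      if left.2 ≠ right.2 then res + min left.2 right.2
      else pvWhileA counts i (j + 1) (res + left.2)
    else res
  else res
termination_by ((counts.length : Int) - (i + j)).toNat
decreasing_by omega

def countSubstrings (s : String) : Int :=
  let l := s.toList
  let n : Int := (l.length : Int)
  let st := (PySem.List.pyRange 0 (n - 1) 1).foldl (pvStep1 l) ([], 1)
  let counts := st.1 ++ [((PySem.List.pyGet? l (-1)).getD ' ', st.2)]
  let m : Int := (counts.length : Int)
  (PySem.List.pyRange 0 m 1).foldl (fun res i =>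
    let c := (PySem.List.pyGetD counts i (' ', 0)).2
    pvWhileA counts i 1 (res + PySem.Int.floordiv (c * (c + 1)) 2)) 0

-- ===== PORT B =====

-- run-length encoding by a per-character fold (update the last run in place)
def pvRuns (l : List Char) : List (Char × Int) :=
  l.foldl (fun rs ch =>
    match rs.getLast? with
    | some (c, k) => if c = ch then rs.dropLast ++ [(ch, k + 1)] else rs ++ [(ch, 1)]
    | none => [(ch, 1)]) []

-- one level of B's sweep: every still-alive center i looks at shell d
def pvLevel (runs : List (Char × Int)) (d : Int) (st : Int × List Int) : Int × List Int :=
  st.2.foldl (fun (acc : Int × List Int) i =>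
    if i - d < 0 ∨ i + d ≥ (runs.length : Int) then acc
    else
      let L := PySem.List.pyGetD runs (i - d) (' ', 0)
      let R := PySem.List.pyGetD runs (i + d) (' ', 0)
      if L.1 ≠ R.1 then acc
      else if L.2 = R.2 then (acc.1 + L.2, acc.2 ++ [i])
      else (acc.1 + min L.2 R.2, acc.2)) (st.1, [])

def countSubstrings_alt (s : String) : Int :=
  let runs := pvRuns s.toList
  let res := (runs.map (fun p => PySem.Int.floordiv (p.2 * (p.2 + 1)) 2)).sum
  let m : Int := (runs.length : Int)
  let st := (PySem.List.pyRange 1 m 1).foldl (fun st d => pvLevel runs d st)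
    (res, PySem.List.pyRange 0 m 1)
  st.1

-- ===== PRECONDITION & SPEC =====
-- Pre_ excludes only the empty string, on which A raises IndexError (s[-1]).
def Pre_countSubstrings (s : String) : Prop := s ≠ ""
instance (s : String) : Decidable (Pre_countSubstrings s) := by unfold Pre_countSubstrings; infer_instance
def pvWitness_countSubstrings : String := "aabccc"

def Spec_countSubstrings (s : String) (out : Int) : Prop := out = countSubstrings_alt s
instance (s : String) (out : Int) : Decidable (Spec_countSubstrings s out) := by unfold Spec_countSubstrings; infer_instance

-- ===== CLAIM (what is proved, stated in full; the proofs are below) =====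
def Claim_equal_countSubstrings : Prop := ∀ (s : String), Dom_countSubstrings s → Pre_countSubstrings s → Spec_countSubstrings s (countSubstrings s)

-- ===== LEMMAS AND PROOFS =====

-- the shell-d contribution of center i (0 unless shells 1..d-1 are exact matches,
-- shell d is in bounds and its two runs share the character)
def pvTerm (R : List (Char × Int)) (i d : Nat) : Int :=
  if d ≤ i ∧ i + d < R.length ∧ (R.getD (i - d) (' ', 0)).1 = (R.getD (i + d) (' ', 0)).1 ∧
      (∀ t < d, 1 ≤ t → R.getD (i - t) (' ', 0) = R.getD (i + t) (' ', 0))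
  then min (R.getD (i - d) (' ', 0)).2 (R.getD (i + d) (' ', 0)).2 else 0

-- Σ_{d' = d .. R.length-1} pvTerm R i d'
def pvSumT (R : List (Char × Int)) (i d : Nat) : Int :=
  if d < R.length then pvTerm R i d + pvSumT R i (d + 1) else 0
termination_by R.length - d

-- does center i survive level d?
def pvKeep (R : List (Char × Int)) (d i : Nat) : Bool :=
  decide (d ≤ i ∧ i + d < R.length ∧ R.getD (i - d) (' ', 0) = R.getD (i + d) (' ', 0))

-- the frontier after levels 1..d
def pvAlive (R : List (Char × Int)) : Nat → List Nat
  | 0 => List.range R.length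
  | d + 1 => (pvAlive R d).filter (pvKeep R (d + 1))

-- total contribution of levels d+1 .. d+k
def pvLevFrom (R : List (Char × Int)) (d : Nat) : Nat → Int
  | 0 => 0
  | k + 1 => ((pvAlive R d).map (fun i => pvTerm R i (d + 1))).sum + pvLevFrom R (d + 1) k

lemma pvAlive_mem (R : List (Char × Int)) (d i : Nat) :
    i ∈ pvAlive R d ↔ i < R.length ∧ ∀ t ≤ d, 1 ≤ t → pvKeep R t i = true := by
  induction d with
  | zero => simp [pvAlive]
  | succ d ih =>
    simp [pvAlive, List.mem_filter, ih]
    constructor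
    · rintro ⟨⟨h1, h2⟩, h3⟩
      refine ⟨h1, fun t ht h1t => ?_⟩
      rcases Nat.lt_or_ge t (d + 1) with h | h
      · exact h2 t (by omega) h1t
      · have : t = d + 1 := by omega
        simpa [this] using h3
    · rintro ⟨h1, h2⟩
      exact ⟨⟨h1, fun t ht h1t => h2 t (by omega) h1t⟩, h2 (d + 1) le_rfl (by omega)⟩

-- pvSumT vanishes once the shells are out of bounds
lemma pvSumT_zero_aux (R : List (Char × Int)) (i : Nat) : ∀ (k d : Nat), R.length ≤ d + k →
    ¬(d ≤ i ∧ i + d < R.length) → pvSumT R i d = 0 := by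
  intro k
  induction k with
  | zero => intro d hk _; rw [pvSumT, if_neg (by omega)]
  | succ k ih =>
    intro d hk hb
    by_cases hdl : d < R.length
    · rw [pvSumT, if_pos hdl, pvTerm, if_neg (by tauto), ih (d + 1) (by omega) (by omega)]; ring
    · rw [pvSumT, if_neg hdl]

lemma pvSumT_zero (R : List (Char × Int)) (i d : Nat) (hb : ¬(d ≤ i ∧ i + d < R.length)) :
    pvSumT R i d = 0 :=
  pvSumT_zero_aux R i R.length d (by omega) hb

-- pvSumT vanishes beyond a mismatched shell
lemma pvSumT_zero_mis_aux (R : List (Char × Int)) (i t0 : Nat) (h1 : 1 ≤ t0)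
    (hne : R.getD (i - t0) (' ', 0) ≠ R.getD (i + t0) (' ', 0)) : ∀ (k d : Nat), R.length ≤ d + k →
    t0 < d → pvSumT R i d = 0 := by
  intro k
  induction k with
  | zero => intro d hk _; rw [pvSumT, if_neg (by omega)]
  | succ k ih =>
    intro d hk ht
    by_cases hdl : d < R.length
    · have hterm : pvTerm R i d = 0 := by
        rw [pvTerm, if_neg]
        rintro ⟨-, -, -, hall⟩
        exact hne (hall t0 ht h1)
      rw [pvSumT, if_pos hdl, hterm, ih (d + 1) (by omega) (by omega)]; ring
    · rw [pvSumT, if_neg hdl]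

lemma pvSumT_zero_mis (R : List (Char × Int)) (i t0 d : Nat) (h1 : 1 ≤ t0) (ht : t0 < d)
    (hne : R.getD (i - t0) (' ', 0) ≠ R.getD (i + t0) (' ', 0)) : pvSumT R i d = 0 :=
  pvSumT_zero_mis_aux R i t0 h1 hne R.length d (by omega) ht

-- W: A's while loop from shell d adds exactly Σ_{d'≥d} pvTerm, given shells < d exact
lemma pvWhileA_eq_sum_aux (R : List (Char × Int)) (i : Nat) : ∀ (k d : Nat) (res : Int), R.length ≤ d + k → 1 ≤ d →
    (∀ t < d, 1 ≤ t → R.getD (i - t) (' ', 0) = R.getD (i + t) (' ', 0)) →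
    pvWhileA R (i : Int) (d : Int) res = res + pvSumT R i d := by
  intro k
  induction k with
  | zero =>
    intro d res hk hd hinv
    rw [pvWhileA, dif_neg (by omega), pvSumT, if_neg (by omega)]; ring
  | succ k ih =>
    intro d res hk hd hinv
    by_cases hb : d ≤ i ∧ i + d < R.length
    · have hcl : (i : Int) - (d : Int) = ((i - d : Nat) : Int) := by omega
      have hcr : (i : Int) + (d : Int) = ((i + d : Nat) : Int) := by omega
      have hL : PySem.List.pyGetD R ((i : Int) - (d : Int)) (' ', 0) = R.getD (i - d) (' ', 0) := by
        rw [hcl, PySem.List.pyGetD_natCast]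
      have hR : PySem.List.pyGetD R ((i : Int) + (d : Int)) (' ', 0) = R.getD (i + d) (' ', 0) := by
        rw [hcr, PySem.List.pyGetD_natCast]
      rw [pvWhileA, dif_pos (by constructor <;> omega)]
      simp only [hL, hR]
      by_cases hc : (R.getD (i - d) (' ', 0)).1 = (R.getD (i + d) (' ', 0)).1
      · rw [if_pos hc]
        by_cases hn : (R.getD (i - d) (' ', 0)).2 = (R.getD (i + d) (' ', 0)).2
        · rw [if_neg (by simpa using hn)]
          have heq : R.getD (i - d) (' ', 0) = R.getD (i + d) (' ', 0) :=
            Prod.ext hc hn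
          have hinv' : ∀ t < d + 1, 1 ≤ t → R.getD (i - t) (' ', 0) = R.getD (i + t) (' ', 0) := by
            intro t ht h1t
            rcases Nat.lt_or_ge t d with h | h
            · exact hinv t h h1t
            · have : t = d := by omega
              simpa [this] using heq
          have hcast : (d : Int) + 1 = ((d + 1 : Nat) : Int) := by omega
          rw [hcast, ih (d + 1) _ (by omega) (by omega) hinv']
          have hterm : pvTerm R i d = (R.getD (i - d) (' ', 0)).2 := by
            rw [pvTerm, if_pos ⟨hb.1, hb.2, hc, fun t ht h1t => hinv t ht h1t⟩, heq, min_self]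
          have hsum : pvSumT R i d = pvTerm R i d + pvSumT R i (d + 1) := by
            rw [pvSumT, if_pos (by omega)]
          rw [hsum, hterm]; ring
        · rw [if_pos (by simpa using hn)]
          have hterm : pvTerm R i d = min (R.getD (i - d) (' ', 0)).2 (R.getD (i + d) (' ', 0)).2 := by
            rw [pvTerm, if_pos ⟨hb.1, hb.2, hc, fun t ht h1t => hinv t ht h1t⟩]
          have hrest : pvSumT R i (d + 1) = 0 :=
            pvSumT_zero_mis R i d (d + 1) (by omega) (by omega)
              (fun h => hn (by rw [h]))
          rw [pvSumT, if_pos (by omega), hterm, hrest]; ring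
      · rw [if_neg hc]
        have hterm : pvTerm R i d = 0 := by
          rw [pvTerm, if_neg (by tauto)]
        have hrest : pvSumT R i (d + 1) = 0 :=
          pvSumT_zero_mis R i d (d + 1) (by omega) (by omega)
            (fun h => hc (by rw [h]))
        rw [pvSumT, if_pos (by omega), hterm, hrest]; ring
    · rw [pvWhileA, dif_neg (by omega), pvSumT_zero R i d hb]; ring

lemma pvWhileA_eq_sum (R : List (Char × Int)) (i d : Nat) (res : Int) (hd : 1 ≤ d)
    (hinv : ∀ t < d, 1 ≤ t → R.getD (i - t) (' ', 0) = R.getD (i + t) (' ', 0)) :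
    pvWhileA R (i : Int) (d : Int) res = res + pvSumT R i d :=
  pvWhileA_eq_sum_aux R i R.length d res (by omega) hd hinv

-- sum of a filtered frontier equals the full-range sum when dropped centers contribute 0
lemma pvSum_filter (f : Nat → Int) (p : Nat → Bool) (xs : List Nat)
    (h : ∀ i ∈ xs, p i = false → f i = 0) :
    ((xs.filter p).map f).sum = (xs.map f).sum := by
  induction xs with
  | nil => simp
  | cons x xs ih =>
    by_cases hp : p x = true
    · simp [hp, ih fun i hi => h i (List.mem_cons_of_mem _ hi)]
    · have hx : f x = 0 := h x (List.mem_cons_self) (by simpa using hp)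
      simp [hp, hx, ih fun i hi => h i (List.mem_cons_of_mem _ hi)]

-- a function vanishing on centers dropped by levels 1..d sums equally over frontier and full range
lemma pvAlive_sum_aux (R : List (Char × Int)) : ∀ (d : Nat) (f : Nat → Int),
    (∀ i < R.length, ¬(∀ t ≤ d, 1 ≤ t → pvKeep R t i = true) → f i = 0) →
    ((pvAlive R d).map f).sum = ((List.range R.length).map f).sum := by
  intro d
  induction d with
  | zero => intro f _; rfl
  | succ d ih =>
    intro f hf
    have h1 : ((pvAlive R (d + 1)).map f).sum = ((pvAlive R d).map f).sum := by
      show (((pvAlive R d).filter (pvKeep R (d + 1))).map f).sum = _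
      refine pvSum_filter f _ _ (fun i hi hp => ?_)
      have him := (pvAlive_mem R d i).mp hi
      refine hf i him.1 (fun hall => ?_)
      rw [hall (d + 1) le_rfl (by omega)] at hp; exact Bool.noConfusion hp
    rw [h1]
    refine ih f (fun i hil hall => hf i hil (fun h => hall (fun t ht h1t => h t (by omega) h1t)))

-- the frontier sum at level d+1 equals the full-range sum at level d+1
lemma pvAlive_sum (R : List (Char × Int)) (d : Nat) :
    ((pvAlive R d).map (fun i => pvTerm R i (d + 1))).sum
      = ((List.range R.length).map (fun i => pvTerm R i (d + 1))).sum := by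
  refine pvAlive_sum_aux R d _ (fun i hil hall => ?_)
  rw [pvTerm, if_neg]
  rintro ⟨hb1, hb2, -, hprev⟩
  refine hall (fun t ht h1t => ?_)
  unfold pvKeep
  have := hprev t (by omega) h1t
  simp only [decide_eq_true_eq]
  exact ⟨by omega, by omega, this⟩

-- one level of B processes a frontier: adds the level's terms, keeps the survivors
lemma pvLevel_fold (R : List (Char × Int)) (d : Nat) (hd : 1 ≤ d) :
    ∀ (xs : List Nat), (∀ i ∈ xs, i ∈ pvAlive R (d - 1)) → ∀ (a : Int) (zs : List Int),
    (xs.map (Nat.cast : Nat → Int)).foldl (fun (acc : Int × List Int) i =>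
      if i - (d : Int) < 0 ∨ i + (d : Int) ≥ (R.length : Int) then acc
      else if (PySem.List.pyGetD R (i - (d : Int)) (' ', 0)).1 ≠ (PySem.List.pyGetD R (i + (d : Int)) (' ', 0)).1 then acc
      else if (PySem.List.pyGetD R (i - (d : Int)) (' ', 0)).2 = (PySem.List.pyGetD R (i + (d : Int)) (' ', 0)).2 then
        (acc.1 + (PySem.List.pyGetD R (i - (d : Int)) (' ', 0)).2, acc.2 ++ [i])
      else (acc.1 + min (PySem.List.pyGetD R (i - (d : Int)) (' ', 0)).2 (PySem.List.pyGetD R (i + (d : Int)) (' ', 0)).2, acc.2)) (a, zs)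
    = (a + (xs.map (fun i => pvTerm R i d)).sum, zs ++ ((xs.filter (pvKeep R d)).map (Nat.cast : Nat → Int))) := by
  intro xs
  induction xs with
  | nil => intro _ a zs; simp
  | cons i xs ih =>
    intro hxs a zs
    have him := (pvAlive_mem R (d - 1) i).mp (hxs i List.mem_cons_self)
    have hinv : ∀ t < d, 1 ≤ t → R.getD (i - t) (' ', 0) = R.getD (i + t) (' ', 0) := by
      intro t ht h1t
      have hk := him.2 t (by omega) h1t
      unfold pvKeep at hk; simp only [decide_eq_true_eq] at hk
      exact hk.2.2
    have ihx := ih (fun j hj => hxs j (List.mem_cons_of_mem _ hj))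
    simp only [List.map_cons, List.foldl_cons]
    by_cases hb : d ≤ i ∧ i + d < R.length
    · have hcond : ¬((i : Int) - (d : Int) < 0 ∨ (i : Int) + (d : Int) ≥ (R.length : Int)) := by
        push_cast; omega
      have hL : PySem.List.pyGetD R ((i : Int) - (d : Int)) (' ', 0) = R.getD (i - d) (' ', 0) := by
        rw [show (i : Int) - (d : Int) = ((i - d : Nat) : Int) by omega, PySem.List.pyGetD_natCast]
      have hR : PySem.List.pyGetD R ((i : Int) + (d : Int)) (' ', 0) = R.getD (i + d) (' ', 0) := by
        rw [show (i : Int) + (d : Int) = ((i + d : Nat) : Int) by omega, PySem.List.pyGetD_natCast]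
      rw [if_neg hcond]
      simp only [hL, hR]
      by_cases hc : (R.getD (i - d) (' ', 0)).1 = (R.getD (i + d) (' ', 0)).1
      · rw [if_neg (not_not_intro hc)]
        by_cases hn : (R.getD (i - d) (' ', 0)).2 = (R.getD (i + d) (' ', 0)).2
        · have heq : R.getD (i - d) (' ', 0) = R.getD (i + d) (' ', 0) := Prod.ext hc hn
          have hterm : pvTerm R i d = (R.getD (i - d) (' ', 0)).2 := by
            rw [pvTerm, if_pos ⟨hb.1, hb.2, hc, hinv⟩, heq, min_self]
          have hkeep : pvKeep R d i = true := by
            unfold pvKeep; simp only [decide_eq_true_eq]; exact ⟨hb.1, hb.2, heq⟩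
          rw [if_pos hn, ihx, List.filter_cons_of_pos hkeep]
          simp [hterm, List.append_assoc]
          ring
        · have hterm : pvTerm R i d = min (R.getD (i - d) (' ', 0)).2 (R.getD (i + d) (' ', 0)).2 := by
            rw [pvTerm, if_pos ⟨hb.1, hb.2, hc, hinv⟩]
          have hkeep : pvKeep R d i = false := by
            unfold pvKeep; simp only [decide_eq_false_iff_not]
            rintro ⟨-, -, heq⟩; exact hn (by rw [heq])
          rw [if_neg hn, ihx, List.filter_cons_of_neg (by simp [hkeep])]
          simp [hterm]
          ring
      · have hterm : pvTerm R i d = 0 := by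
          rw [pvTerm, if_neg (by tauto)]
        have hkeep : pvKeep R d i = false := by
          unfold pvKeep; simp only [decide_eq_false_iff_not]
          rintro ⟨-, -, heq⟩; exact hc (by rw [heq])
        rw [if_pos hc, ihx, List.filter_cons_of_neg (by simp [hkeep])]
        simp [hterm]
    · have hcond : ((i : Int) - (d : Int) < 0 ∨ (i : Int) + (d : Int) ≥ (R.length : Int)) := by
        push_cast; omega
      have hterm : pvTerm R i d = 0 := by
        rw [pvTerm, if_neg (by tauto)]
      have hkeep : pvKeep R d i = false := by
        unfold pvKeep; simp only [decide_eq_false_iff_not]; tauto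
      rw [if_pos hcond, ihx, List.filter_cons_of_neg (by simp [hkeep])]
      simp [hterm]

-- B's outer loop over levels d+1 .. d+k
lemma pvOuter (R : List (Char × Int)) : ∀ (k d : Nat) (a : Int),
    (PySem.List.pyRange ((d : Int) + 1) ((d : Int) + 1 + (k : Int)) 1).foldl
      (fun st e => pvLevel R e st) (a, (pvAlive R d).map (Nat.cast : Nat → Int))
    = (a + pvLevFrom R d k, (pvAlive R (d + k)).map (Nat.cast : Nat → Int)) := by
  intro k
  induction k with
  | zero =>
    intro d a
    rw [PySem.List.pyRange_one_eq_nil (by omega)]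
    simp [pvLevFrom]
  | succ k ih =>
    intro d a
    have hlev : pvLevel R ((d : Int) + 1) (a, (pvAlive R d).map (Nat.cast : Nat → Int))
        = (a + ((pvAlive R d).map (fun i => pvTerm R i (d + 1))).sum,
           (pvAlive R (d + 1)).map (Nat.cast : Nat → Int)) := by
      have h := pvLevel_fold R (d + 1) (by omega) (pvAlive R d)
        (fun i hi => by simpa using hi) a []
      rw [show ((d : Int) + 1) = (((d + 1 : Nat)) : Int) by push_cast; ring]
      simp only [pvLevel]
      simpa [pvAlive] using h
    rw [PySem.List.pyRange_one_cons (by omega), List.foldl_cons, hlev]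
    have hr : PySem.List.pyRange ((d : Int) + 1 + 1) ((d : Int) + 1 + ((k : Int) + 1)) 1
        = PySem.List.pyRange (((d + 1 : Nat) : Int) + 1) (((d + 1 : Nat) : Int) + 1 + (k : Int)) 1 := by
      congr 1 <;> push_cast <;> ring
    rw [show ((k + 1 : Nat) : Int) = (k : Int) + 1 by push_cast; ring, hr, ih (d + 1)]
    have hd : d + (k + 1) = (d + 1) + k := by omega
    rw [hd]
    simp [pvLevFrom, add_assoc]

-- pvSumT as a list sum, for the swap
lemma pvSumT_eq_list (R : List (Char × Int)) (i : Nat) : ∀ (k d : Nat), d + k = R.length →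
    pvSumT R i d = ((List.range k).map (fun t => pvTerm R i (d + t))).sum := by
  intro k
  induction k with
  | zero => intro d h; rw [pvSumT, if_neg (by omega)]; rfl
  | succ k ih =>
    intro d h
    rw [pvSumT, if_pos (by omega), ih (d + 1) (by omega), List.range_succ_eq_map]
    simp only [List.map_cons, List.map_map, List.sum_cons, Nat.add_zero]
    congr 2
    refine List.map_congr_left (fun t _ => ?_)
    simp only [Function.comp_apply]
    congr 1
    omega

-- double-sum swap over lists
lemma pvSum_swap (f : Nat → Nat → Int) (xs ys : List Nat) :
    (xs.map (fun x => (ys.map (f x)).sum)).sum = (ys.map (fun y => (xs.map (fun x => f x y)).sum)).sum := by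
  induction xs with
  | nil =>
    induction ys with
    | nil => simp
    | cons y ys ihy => simp at ihy ⊢
  | cons x xs ih =>
    simp only [List.map_cons, List.sum_cons, ih]
    rw [← PySem.List.sum_map_add_int]

-- A's run construction equals B's
lemma pvRuns_eq (l : List Char) (hl : l ≠ []) :
    (let st := (PySem.List.pyRange 0 ((l.length : Int) - 1) 1).foldl (pvStep1 l) ([], 1)
     st.1 ++ [((PySem.List.pyGet? l (-1)).getD ' ', st.2)]) = pvRuns l := by
  show (let st := (PySem.List.pyRange 0 ((l.length : Int) - 1) 1).foldl (pvStep1 l) ([], 1)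
        st.1 ++ [((PySem.List.pyGet? l (-1)).getD ' ', st.2)]) = pvRuns l
  revert hl
  induction l using List.reverseRecOn with
  | nil => intro hl; exact absurd rfl hl
  | append_singleton u a ih =>
    intro _
    by_cases hu : u = []
    · subst hu
      simp [pvRuns, PySem.List.pyRange_one_eq_nil, PySem.List.pyGet?_neg_one]
    · have hn : 1 ≤ u.length := by have := List.length_pos_iff.mpr hu; omega
      -- the range over l's pairs splits into u's pairs plus the final lookahead index
      have hlen : ((u ++ [a]).length : Int) - 1 = (((u.length - 1 : Nat)) : Int) + 1 := by
        simp [List.length_append]; omega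
      have hsplit : PySem.List.pyRange 0 (((u.length - 1 : Nat) : Int) + 1) 1
          = PySem.List.pyRange 0 (((u.length - 1 : Nat)) : Int) 1 ++ [((u.length - 1 : Nat) : Int)] :=
        PySem.List.pyRange_one_succ_right (by omega)
      -- on the prefix indices, a step of l's loop is a step of u's loop
      have hcong : ∀ (st : List (Char × Int) × Int) (j : Int), j ∈ PySem.List.pyRange 0 (((u.length - 1 : Nat)) : Int) 1 →
          pvStep1 (u ++ [a]) st j = pvStep1 u st j := by
        intro st j hj
        rw [PySem.List.mem_pyRange_one] at hj
        have hg : ∀ (j' : Int), 0 ≤ j' → j' < (u.length : Int) →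
            PySem.List.pyGet? (u ++ [a]) j' = PySem.List.pyGet? u j' := by
          intro j' h0 hlt
          rw [PySem.List.pyGet?_of_nonneg (u ++ [a]) h0, PySem.List.pyGet?_of_nonneg u h0,
            List.getElem?_append_left (by omega)]
        unfold pvStep1
        rw [hg j (by omega) (by omega), hg (j + 1) (by omega) (by omega)]
      set st' := (PySem.List.pyRange 0 (((u.length : Int)) - 1) 1).foldl (pvStep1 u) ([], 1) with hst'
      have hku : ((u.length : Int)) - 1 = (((u.length - 1 : Nat)) : Int) := by omega
      have hfold : (PySem.List.pyRange 0 (((u ++ [a]).length : Int) - 1) 1).foldl (pvStep1 (u ++ [a])) ([], 1)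
          = pvStep1 (u ++ [a]) st' ((u.length - 1 : Nat) : Int) := by
        rw [hlen, hsplit, List.foldl_append, List.foldl_cons, List.foldl_nil,
          PySem.List.foldl_congr_mem _ (pvStep1 (u ++ [a])) (pvStep1 u) ([], 1) (fun st j hj => hcong st j hj), hst', hku]
      have ihu := ih hu
      have hlast? : PySem.List.pyGet? u (-1) = some (u.getLast hu) := by
        rw [PySem.List.pyGet?_neg_one, List.getLast?_eq_some_getLast hu]
      rw [hlast?] at ihu
      simp only at ihu
      -- the two lookahead reads of the final step
      have hread1 : PySem.List.pyGet? (u ++ [a]) ((u.length - 1 : Nat) : Int) = some (u.getLast hu) := by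
        rw [PySem.List.pyGet?_natCast, List.getElem?_append_left (by omega),
          ← List.getLast?_eq_getElem?, List.getLast?_eq_some_getLast hu]
      have hread2 : PySem.List.pyGet? (u ++ [a]) (((u.length - 1 : Nat) : Int) + 1) = some a := by
        rw [show ((u.length - 1 : Nat) : Int) + 1 = ((u.length : Nat) : Int) by omega]
        exact PySem.List.pyGet?_append_length u [] a
      have hruns : pvRuns (u ++ [a]) = (match (pvRuns u).getLast? with
          | some (c, k) => if c = a then (pvRuns u).dropLast ++ [(a, k + 1)] else pvRuns u ++ [(a, 1)]
          | none => [(a, 1)]) := by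
        unfold pvRuns
        rw [List.foldl_append, List.foldl_cons, List.foldl_nil]
      rw [show PySem.List.pyGet? (u ++ [a]) (-1) = some a from PySem.List.pyGet?_neg_one_append_singleton u a]
      simp only [hfold]
      unfold pvStep1
      rw [hread1, hread2]
      have hgl : (pvRuns u).getLast? = some (u.getLast hu, st'.2) := by
        rw [← ihu, List.getLast?_concat]; simp
      by_cases hla : u.getLast hu = a
      · rw [if_pos (by rw [hla]), hruns, hgl]
        simp only [if_pos hla]
        rw [← ihu, List.dropLast_concat]
        simp
      · rw [if_neg (by simpa using hla), hruns, hgl]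
        simp only [if_neg hla]
        rw [← ihu]
        simp

-- pvRuns of a nonempty list is nonempty
lemma pvRuns_aux (step : List (Char × Int) → Char → List (Char × Int))
    (hstep : ∀ rs c, rs ≠ [] → step rs c ≠ []) :
    ∀ (l : List Char) (rs : List (Char × Int)), rs ≠ [] → List.foldl step rs l ≠ [] := by
  intro l
  induction l with
  | nil => intro rs h; simpa using h
  | cons a l ih => intro rs h; exact ih (step rs a) (hstep rs a h)

lemma pvRuns_ne_nil (l : List Char) (hl : l ≠ []) : pvRuns l ≠ [] := by
  obtain ⟨a, l', rfl⟩ := List.exists_cons_of_ne_nil hl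
  unfold pvRuns
  rw [List.foldl_cons]
  refine pvRuns_aux _ (fun rs c hrs => ?_) l' _ (by simp)
  match h : rs.getLast? with
  | none => simp
  | some (c', k) => simp only [h]; split <;> simp

-- indexing a list by range equals mapping over it
lemma pvMap_getD (R : List (Char × Int)) (f : (Char × Int) → Int) :
    ((List.range R.length).map (fun i => f (R.getD i (' ', 0)))).sum = (R.map f).sum := by
  congr 1
  refine List.ext_getElem (by simp) (fun i h1 h2 => ?_)
  simp only [List.getElem_map, List.getElem_range]
  rw [List.getD_eq_getElem?_getD, List.getElem?_eq_getElem (by simpa using h2)]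
  rfl

-- the level sums written over the full center range
lemma pvLevFrom_full (R : List (Char × Int)) : ∀ (k d : Nat),
    pvLevFrom R d k = ((List.range k).map
      (fun t => ((List.range R.length).map (fun i => pvTerm R i (d + 1 + t))).sum)).sum := by
  intro k
  induction k with
  | zero => intro d; rfl
  | succ k ih =>
    intro d
    show ((pvAlive R d).map (fun i => pvTerm R i (d + 1))).sum + pvLevFrom R (d + 1) k = _
    rw [pvAlive_sum, ih (d + 1), List.range_succ_eq_map]
    simp only [List.map_cons, List.map_map, List.sum_cons, Nat.add_zero]
    congr 2
    refine List.map_congr_left (fun t _ => ?_)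
    simp only [Function.comp_apply]
    have he : d + 1 + (t + 1) = d + 1 + 1 + t := by omega
    rw [he]

-- ===== VERDICT (by name: the statement is the Claim_ definition above) =====
theorem countSubstrings_spec : Claim_equal_countSubstrings := by
  intro s _ hpre
  unfold Spec_countSubstrings countSubstrings countSubstrings_alt
  have hl : s.toList ≠ [] := by
    simpa [String.toList_eq_nil_iff] using hpre
  set l := s.toList with hldef
  set R := pvRuns l with hRdef
  have hRne : R ≠ [] := pvRuns_ne_nil l hl
  have hm1 : 1 ≤ R.length := by
    have := List.length_pos_iff.mpr hRne; omega
  set m := R.length with hm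
  -- A's counts list is R
  have hcounts : ((PySem.List.pyRange 0 ((l.length : Int) - 1) 1).foldl (pvStep1 l) ([], 1)).1
      ++ [((PySem.List.pyGet? l (-1)).getD ' ',
           ((PySem.List.pyRange 0 ((l.length : Int) - 1) 1).foldl (pvStep1 l) ([], 1)).2)] = R :=
    pvRuns_eq l hl
  simp only [hcounts]
  -- A's outer loop is a sum of per-center contributions
  have hA : (PySem.List.pyRange 0 (m : Int) 1).foldl (fun res i =>
        pvWhileA R i 1 (res + PySem.Int.floordiv ((PySem.List.pyGetD R i (' ', 0)).2 *
          ((PySem.List.pyGetD R i (' ', 0)).2 + 1)) 2)) 0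
      = ((List.range m).map (fun i => PySem.Int.floordiv ((R.getD i (' ', 0)).2 *
          ((R.getD i (' ', 0)).2 + 1)) 2)).sum + ((List.range m).map (fun i => pvSumT R i 1)).sum := by
    rw [PySem.List.foldl_congr_mem _ _
      (fun res i => res + (PySem.Int.floordiv ((R.getD i.toNat (' ', 0)).2 *
        ((R.getD i.toNat (' ', 0)).2 + 1)) 2 + pvSumT R i.toNat 1)) 0
      (fun res i hi => ?_), PySem.List.foldl_add]
    · rw [PySem.List.pyRange_zero_nat, List.map_map]
      simp only [Function.comp_def, Int.toNat_natCast]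
      rw [PySem.List.sum_map_add_int]
      ring
    · rw [PySem.List.mem_pyRange_one] at hi
      have hcast : i = ((i.toNat : Nat) : Int) := by omega
      rw [hcast, PySem.List.pyGetD_natCast, show ((1 : Int)) = ((1 : Nat) : Int) by rfl,
        pvWhileA_eq_sum R i.toNat 1 _ (by omega) (fun t ht h1t => absurd h1t (by omega))]
      simp only [Int.toNat_natCast]
      ring
  rw [hA]
  have hbase : ((List.range m).map (fun i => PySem.Int.floordiv ((R.getD i (' ', 0)).2 *
      ((R.getD i (' ', 0)).2 + 1)) 2)).sum
      = (R.map (fun p => PySem.Int.floordiv (p.2 * (p.2 + 1)) 2)).sum := pvMap_getD R (fun p => PySem.Int.floordiv (p.2 * (p.2 + 1)) 2)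
  have hB1 : PySem.List.pyRange 0 (m : Int) 1 = (pvAlive R 0).map (Nat.cast : Nat → Int) := by
    rw [PySem.List.pyRange_zero_nat]; rfl
  have hB2 : PySem.List.pyRange 1 (m : Int) 1
      = PySem.List.pyRange (((0 : Nat) : Int) + 1) (((0 : Nat) : Int) + 1 + ((m - 1 : Nat) : Int)) 1 := by
    congr 1 <;> (push_cast; omega)
  rw [hB1, hB2, pvOuter R (m - 1) 0 ((R.map (fun p => PySem.Int.floordiv (p.2 * (p.2 + 1)) 2)).sum)]
  rw [hbase]
  show _ = (R.map (fun p => PySem.Int.floordiv (p.2 * (p.2 + 1)) 2)).sum + pvLevFrom R 0 (m - 1)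
  congr 1
  rw [pvLevFrom_full R (m - 1) 0,
    pvSum_swap (fun t i => pvTerm R i (0 + 1 + t)) (List.range (m - 1)) (List.range m)]
  refine congrArg List.sum (List.map_congr_left (fun i _ => ?_))
  rw [pvSumT_eq_list R i (m - 1) 1 (by omega)]
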